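-- pv_equiv track=rewrite | github.com/vedashree-dev/PrepAi-backend | utils/difficulty_labeler.py | label_difficulty
-- ===== SOURCE A (Python) =====
-- def label_difficulty(texts: list[str]) -> list[str]:
--     """
--     Labels a list of texts as Easy/Medium/Hard using heuristics.
--     Used during paper generation.
--     """
--     results = []
--     for text in texts:
--         wc = len(text.split())
--         if wc < 100:
--             results.append("Easy")
--         elif wc < 200:
--             results.append("Medium")
--         else:
--             results.append("Hard")
--     return results
-- ===== SOURCE B (Python) =====
-- def label_difficulty(texts: list[str]) -> list[str]:
--     """Streaming: scan characters counting word starts, stopping early once 200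
--     words are seen; no intermediate word list is built."""
--     results = []
--     for text in texts:
--         wc = 0
--         prev_space = True
--         for ch in text:
--             if ch.isspace():
--                 prev_space = True
--             else:
--                 if prev_space:
--                     wc += 1
--                     if wc >= 200:
--                         break
--                 prev_space = False
--         results.append("Hard" if wc >= 200 else "Medium" if wc >= 100 else "Easy")
--     return results
-- ===== Notes on version B (the rewrite author's own statement) =====
-- stated objective: alternative
-- what changed: B never calls split(): it streams over each text's characters with a prev_space flag, counts word starts, and breaks out as soon as 200 words are seen, then labels by the (capped) count; A builds the full split list and walks an if/elif ladder.
import Mathlib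
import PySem

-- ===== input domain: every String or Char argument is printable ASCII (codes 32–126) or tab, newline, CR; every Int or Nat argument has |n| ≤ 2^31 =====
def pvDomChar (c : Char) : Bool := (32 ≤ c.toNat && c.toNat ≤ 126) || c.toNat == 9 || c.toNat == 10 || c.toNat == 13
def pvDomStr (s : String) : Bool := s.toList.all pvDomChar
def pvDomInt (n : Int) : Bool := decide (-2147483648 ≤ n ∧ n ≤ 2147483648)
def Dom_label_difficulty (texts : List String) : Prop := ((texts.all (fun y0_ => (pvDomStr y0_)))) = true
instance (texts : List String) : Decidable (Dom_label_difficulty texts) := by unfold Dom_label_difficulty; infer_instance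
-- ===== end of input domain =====

-- B streams over each text's characters with a prev_space flag, counting word starts
-- and breaking once 200 words are seen (no split list is built); A splits then branches.


-- ===== PORT A =====
def label_difficulty (texts : List String) : List String :=
  texts.foldl (fun results text =>
    let wc : Int := (PySem.Str.split₀ text).length
    if wc < 100 then results ++ ["Easy"]
    else if wc < 200 then results ++ ["Medium"]
    else results ++ ["Hard"]) []

-- ===== PORT B =====
-- the inner 'for ch in text' loop of Source B: state (prev_space, wc), break at wc = 200
def pvScanB : List Char → Bool → Nat → Nat
  | [], _, wc => wc
  | c :: rest, prevSpace, wc =>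
    if PySem.Chars.isspace c then pvScanB rest true wc
    else if prevSpace then
      (if wc + 1 ≥ 200 then wc + 1 else pvScanB rest false (wc + 1))
    else pvScanB rest false wc

def label_difficulty_alt (texts : List String) : List String :=
  texts.foldl (fun results text =>
    let wc := pvScanB text.toList true 0
    results ++ [if wc ≥ 200 then "Hard" else if wc ≥ 100 then "Medium" else "Easy"]) []

-- ===== PRECONDITION & SPEC =====
def Spec_label_difficulty (texts : List String) (out : List String) : Prop := out = label_difficulty_alt texts
instance (texts : List String) (out : List String) : Decidable (Spec_label_difficulty texts out) := by unfold Spec_label_difficulty; infer_instance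

-- ===== CLAIM =====
def Claim_equal_label_difficulty : Prop := ∀ (texts : List String), Dom_label_difficulty texts → Spec_label_difficulty texts (label_difficulty texts)

-- ===== LEMMAS AND PROOFS =====

-- word starts remaining in cs, given whether the previous character was space
def pvWS : List Char → Bool → Nat
  | [], _ => 0
  | c :: rest, ps =>
    if PySem.Chars.isspace c then pvWS rest true
    else if ps then 1 + pvWS rest false
    else pvWS rest false

theorem pvGo_length (cs : List Char) (cur : List Char) (acc : List (List Char)) :
    (PySem.Chars.split₀.go cs cur acc).length =
      acc.length + (if cur.isEmpty then pvWS cs true else 1 + pvWS cs false) := by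
  induction cs generalizing cur acc with
  | nil =>
    simp only [PySem.Chars.split₀.go, pvWS]
    split_ifs <;> simp_all
  | cons c rest ih =>
    simp only [PySem.Chars.split₀.go, pvWS]
    by_cases hs : PySem.Chars.isspace c
    · simp only [hs, if_true]
      by_cases hc : cur.isEmpty <;> simp [hc, ih] <;> omega
    · simp only [hs]
      by_cases hc : cur.isEmpty <;> simp [hc, ih, List.isEmpty_cons] <;> omega

theorem pvSplit_length (cs : List Char) :
    (PySem.Chars.split₀ cs).length = pvWS cs true := by
  simp [PySem.Chars.split₀, pvGo_length]

theorem pvScanB_eq (cs : List Char) (ps : Bool) (wc : Nat) (h : wc < 200) :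
    pvScanB cs ps wc = min (wc + pvWS cs ps) 200 := by
  induction cs generalizing ps wc with
  | nil => simp [pvScanB, pvWS]; omega
  | cons c rest ih =>
    by_cases hs : PySem.Chars.isspace c
    · simp [pvScanB, pvWS, hs]
      have := ih true wc h
      omega
    · by_cases hp : ps = true
      · subst hp
        by_cases hb : wc + 1 ≥ 200
        · have h200 : wc + 1 = 200 := by omega
          simp [pvScanB, pvWS, hs, hb]
          omega
        · simp [pvScanB, pvWS, hs, hb]
          have := ih false (wc + 1) (by omega)
          omega
      · have hp' : ps = false := by cases ps <;> simp_all
        subst hp'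
        simp [pvScanB, pvWS, hs]
        have := ih false wc h
        omega

theorem pvLabel_eq (text : String) :
    (if (((PySem.Str.split₀ text).length : Int) < 100) then "Easy"
     else if (((PySem.Str.split₀ text).length : Int) < 200) then "Medium" else "Hard")
    = (if pvScanB text.toList true 0 ≥ 200 then "Hard"
       else if pvScanB text.toList true 0 ≥ 100 then "Medium" else "Easy") := by
  have hB : pvScanB text.toList true 0 = min (pvWS text.toList true) 200 := by
    rw [pvScanB_eq text.toList true 0 (by norm_num), Nat.zero_add]
  have hA : (PySem.Str.split₀ text).length = pvWS text.toList true := by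
    simp [PySem.Str.split₀, pvSplit_length]
  simp only [hB, hA]
  by_cases h1 : ((pvWS text.toList true : Int) < 100)
  · have e1 : ¬ min (pvWS text.toList true) 200 ≥ 200 := by omega
    have e2 : ¬ min (pvWS text.toList true) 200 ≥ 100 := by omega
    rw [if_pos h1, if_neg e1, if_neg e2]
  · by_cases h2 : ((pvWS text.toList true : Int) < 200)
    · have e1 : ¬ min (pvWS text.toList true) 200 ≥ 200 := by omega
      have e2 : min (pvWS text.toList true) 200 ≥ 100 := by omega
      rw [if_neg h1, if_pos h2, if_neg e1, if_pos e2]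
    · have e1 : min (pvWS text.toList true) 200 ≥ 200 := by omega
      rw [if_neg h1, if_neg h2, if_pos e1]

theorem pvStepA (acc : List String) (t : String) :
    (if (((PySem.Str.split₀ t).length : Int) < 100) then acc ++ ["Easy"]
     else if (((PySem.Str.split₀ t).length : Int) < 200) then acc ++ ["Medium"]
     else acc ++ ["Hard"])
    = acc ++ [if pvScanB t.toList true 0 ≥ 200 then "Hard"
              else if pvScanB t.toList true 0 ≥ 100 then "Medium" else "Easy"] := by
  rw [← pvLabel_eq]
  split_ifs <;> rfl

-- ===== VERDICT =====
theorem label_difficulty_spec : Claim_equal_label_difficulty := by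
  intro texts hD
  clear hD
  unfold Spec_label_difficulty label_difficulty label_difficulty_alt
  induction texts using List.reverseRecOn with
  | nil => rfl
  | append_singleton ts t ih =>
    rw [List.foldl_append, List.foldl_append, List.foldl_cons, List.foldl_nil,
        List.foldl_cons, List.foldl_nil, ih]
    exact pvStepA _ t
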